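-- pv_equiv track=rewrite | github.com/JunYoungkKwon/Algorithm | programmers/2_level_trainning.py | solution
-- ===== SOURCE A (Python) =====
-- def solution(s):
--     answer = []
--     zero_cnt = 0
--     bin_cnt = 0
--     while len(s) > 1:
--         bin_cnt += 1
--         zero_cnt += s.count("0")
--         s = s.replace("0", "")
--         if s == "1":
--             return [bin_cnt, zero_cnt]
--         a = len(s)
--         s = bin(a)[2:]
--     return [bin_cnt, zero_cnt]
-- ===== SOURCE B (Python) =====
-- def solution(s):
--     def stats(k):
--         # (bit_length, popcount) of k >= 1, by recursion on halving
--         if k == 1: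
--             return (1, 1)
--         length, pop = stats(k // 2)
--         return (length + 1, pop + (k & 1))
--
--     def shrink(k):
--         # k = number of surviving (non-"0") chars after a removal step;
--         # returns (further steps, further zeros removed), composed on the way back up
--         if k <= 1:
--             return (0, 0)
--         length, pop = stats(k)
--         st, z = shrink(pop)
--         return (st + 1, z + (length - pop))
--
--     n = len(s)
--     if n <= 1:
--         return [0, 0]
--     ones = n - s.count("0")
--     st, z = shrink(ones)
--     return [st + 1, z + (n - ones)]
-- ===== Notes on version B (the rewrite author's own statement) =====
-- stated objective: alternative
-- what changed: B replaces A's iterative string-rebuilding simulation (count/replace/bin on strings with accumulator variables) by a recursive function on the surviving-ones integer, with a halving recursion computing bit-length and popcount together, composing the [steps, zeros] answer on the way back up.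
import Mathlib
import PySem

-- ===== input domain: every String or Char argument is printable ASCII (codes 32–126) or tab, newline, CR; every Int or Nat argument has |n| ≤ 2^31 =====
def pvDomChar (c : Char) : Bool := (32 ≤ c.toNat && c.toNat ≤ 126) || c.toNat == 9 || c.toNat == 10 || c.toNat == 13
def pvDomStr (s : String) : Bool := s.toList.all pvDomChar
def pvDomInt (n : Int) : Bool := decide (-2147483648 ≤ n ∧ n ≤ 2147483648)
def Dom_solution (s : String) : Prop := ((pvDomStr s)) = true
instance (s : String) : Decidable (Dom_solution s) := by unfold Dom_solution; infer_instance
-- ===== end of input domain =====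

-- B replaces A's iterative string-rebuilding simulation by recursion on the
-- surviving-ones integer, composing the answer on the way back up; no speed claim.

-- ===== PORT A =====
-- bin(n)[2:] for n ≥ 1 (digits of n in binary, most significant first)
def pvBinPos (n : Nat) : List Char :=
  if h : n = 0 then []
  else pvBinPos (n / 2) ++ [if n % 2 = 1 then '1' else '0']
decreasing_by exact Nat.div_lt_self (Nat.pos_of_ne_zero h) (by norm_num)

-- bin(n)[2:] for n ≥ 0 (bin(0)[2:] = "0")
def pvBin (n : Nat) : List Char := if n = 0 then ['0'] else pvBinPos n

-- A's while loop; fuel only makes it total (it is always sufficient: the state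
-- shrinks to a binary string of length ≤ bit_length of the start length).
def loopA : Nat → List Char → Int → Int → List Int
  | 0, _, bc, zc => [bc, zc]
  | fuel + 1, s, bc, zc =>
    if s.length > 1 then
      let bc' := bc + 1
      let zc' := zc + (s.count '0' : Int)
      let t := s.filter (fun c => c ≠ '0')        -- s.replace("0", "")
      if t = ['1'] then [bc', zc']
      else loopA fuel (pvBin t.length) bc' zc'
    else [bc, zc]

def solution (s : String) : List Int := loopA (s.toList.length + 3) s.toList 0 0

-- ===== PORT B =====
-- stats(k) of Source B: (bit_length, popcount) of k, by recursion on halving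
-- (Python's stats is only ever called with k ≥ 1; the value at 0 is arbitrary)
def pvStats : Nat → Nat × Nat
  | 0 => (0, 0)
  | 1 => (1, 1)
  | k + 2 => ((pvStats ((k + 2) / 2)).1 + 1, (pvStats ((k + 2) / 2)).2 + (k + 2) % 2)
decreasing_by all_goals exact Nat.div_lt_self (Nat.succ_pos _) (by norm_num)

-- shrink(k) of Source B; fuel only makes it total (popcount k < k for k ≥ 2, so
-- fuel k+1 always suffices)
def shrinkB : Nat → Nat → Int × Int
  | 0, _ => (0, 0)
  | fuel + 1, k =>
    if k ≤ 1 then (0, 0)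
    else
      let lp := pvStats k
      let sz := shrinkB fuel lp.2
      (sz.1 + 1, sz.2 + ((lp.1 : Int) - lp.2))

def solution_alt (s : String) : List Int :=
  let n := s.toList.length
  if n ≤ 1 then [0, 0]
  else
    let ones := n - s.toList.count '0'
    let sz := shrinkB (ones + 1) ones
    [sz.1 + 1, sz.2 + ((n : Int) - ones)]

-- ===== PRECONDITION & SPEC =====
def Spec_solution (s : String) (out : List Int) : Prop := out = solution_alt s
instance (s : String) (out : List Int) : Decidable (Spec_solution s out) := by unfold Spec_solution; infer_instance

-- ===== CLAIM (what is proved, stated in full; the proofs are below) =====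
def Claim_equal_solution : Prop := ∀ (s : String), Dom_solution s → Spec_solution s (solution s)

-- ===== LEMMAS AND PROOFS =====

theorem loopA_short (fuel : Nat) (s : List Char) (bc zc : Int) (h : ¬ s.length > 1) :
    loopA fuel s bc zc = [bc, zc] := by
  cases fuel with
  | zero => rfl
  | succ f => simp [loopA, h]

theorem pvStats_two (k : Nat) (hk : 2 ≤ k) :
    pvStats k = ((pvStats (k / 2)).1 + 1, (pvStats (k / 2)).2 + k % 2) := by
  obtain ⟨m, rfl⟩ : ∃ m, k = m + 2 := ⟨k - 2, by omega⟩
  rw [pvStats]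

theorem pvStats_one : pvStats 1 = (1, 1) := by rw [pvStats]

theorem pvStats_two_val : pvStats 2 = (2, 1) := by
  rw [pvStats_two 2 (by norm_num)]; simp [pvStats_one]

theorem pvStats_three_val : pvStats 3 = (2, 2) := by
  rw [pvStats_two 3 (by norm_num)]; simp [pvStats_one]

theorem pvStats_fst_pos (k : Nat) (hk : 1 ≤ k) : 1 ≤ (pvStats k).1 := by
  rcases Nat.lt_or_ge k 2 with h | h
  · interval_cases k <;> simp [pvStats_one]
  · rw [pvStats_two k h]; omega

theorem pvStats_fst_ge2 (k : Nat) (hk : 2 ≤ k) : 2 ≤ (pvStats k).1 := by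
  rw [pvStats_two k hk]
  have := pvStats_fst_pos (k / 2) (by omega)
  omega

theorem pvStats_snd_lt (k : Nat) (hk : 2 ≤ k) : (pvStats k).2 < k := by
  induction k using Nat.strong_induction_on with
  | _ k ih =>
    rcases Nat.lt_or_ge k 4 with h | h
    · interval_cases k <;> simp_all [pvStats_two_val, pvStats_three_val]
    · rw [pvStats_two k hk]
      have := ih (k / 2) (by omega) (by omega)
      omega

-- the binary string A works on, characterised by B's stats
theorem pvBinPos_stats (k : Nat) (hk : 1 ≤ k) :
    (pvBinPos k).length = (pvStats k).1 ∧
    (pvBinPos k).filter (fun c => c ≠ '0') = List.replicate (pvStats k).2 '1' := by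
  induction k using Nat.strong_induction_on with
  | _ k ih =>
    rcases Nat.lt_or_ge k 2 with h | h
    · interval_cases k
      refine ⟨?_, ?_⟩ <;> rw [pvStats_one] <;> rw [pvBinPos] <;> rw [pvBinPos] <;> simp
    · have hhalf : 1 ≤ k / 2 := by omega
      obtain ⟨ihl, ihf⟩ := ih (k / 2) (by omega) hhalf
      rw [pvBinPos, dif_neg (by omega : ¬ k = 0), pvStats_two k h]
      constructor
      · simp [ihl]
      · rw [List.filter_append, ihf, List.replicate_add]
        rcases Nat.mod_two_eq_zero_or_one k with hm | hm <;> simp [hm]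

theorem filter_length_count_add (s : List Char) :
    (s.filter (fun c => c ≠ '0')).length + s.count '0' = s.length := by
  induction s with
  | nil => rfl
  | cons a l ih =>
    simp only [List.filter_cons, List.count_cons, decide_not]
    by_cases h : a = '0' <;> simp [h] <;> simp at ih <;> omega

-- A's loop on a string bin(k) computes B's shrink(k), for k ≥ 2
theorem loopA_shrink (f : Nat) :
    ∀ (k : Nat) (bc zc : Int), 2 ≤ k → k < f →
      loopA f (pvBinPos k) bc zc = [bc + (shrinkB f k).1, zc + (shrinkB f k).2] := by
  induction f with
  | zero => intro k bc zc hk hf; omega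
  | succ g ih =>
    intro k bc zc hk hf
    obtain ⟨hlen, hfil⟩ := pvBinPos_stats k (by omega)
    have hL2 : 2 ≤ (pvStats k).1 := pvStats_fst_ge2 k hk
    have hplt : (pvStats k).2 < k := pvStats_snd_lt k hk
    have hcount : (pvBinPos k).count '0' + (pvStats k).2 = (pvStats k).1 := by
      have h1 := filter_length_count_add (pvBinPos k)
      rw [hfil, List.length_replicate, hlen] at h1
      omega
    rw [loopA, shrinkB, if_pos (show (pvBinPos k).length > 1 by rw [hlen]; omega),
      if_neg (show ¬ k ≤ 1 by omega)]
    simp only [hfil]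
    rcases Nat.lt_or_ge (pvStats k).2 2 with hple | hpge
    · -- popcount 0 or 1: A stops now or after one length-1 string; shrinkB g p = (0,0)
      have hsz : shrinkB g (pvStats k).2 = (0, 0) := by
        cases g with
        | zero => rfl
        | succ g' => rw [shrinkB, if_pos (by omega)]
      rcases Nat.lt_or_ge (pvStats k).2 1 with hp0 | hp1
      · -- popcount 0: t = [], A continues with "0" (length 1) and stops
        have hp0' : (pvStats k).2 = 0 := by omega
        rw [hp0'] at hsz ⊢
        rw [if_neg (by simp), loopA_short g _ _ _ (by simp [pvBin]), hsz]
        simp only [List.cons.injEq, and_true]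
        constructor <;> push_cast <;> omega
      · -- popcount 1: t = ['1'], A returns
        have hp1' : (pvStats k).2 = 1 := by omega
        rw [hp1'] at hsz ⊢
        rw [if_pos (by simp), hsz]
        simp only [List.cons.injEq, and_true]
        constructor <;> push_cast <;> omega
    · -- popcount ≥ 2: A continues with bin(popcount); induction hypothesis
      rw [if_neg (by
        intro hcontra
        have h2 := congrArg List.length hcontra
        simp at h2
        omega)]
      have hbin : pvBin (List.replicate (pvStats k).2 '1').length = pvBinPos (pvStats k).2 := by
        rw [List.length_replicate, pvBin, if_neg (by omega)]
      rw [hbin, ih (pvStats k).2 _ _ hpge (by omega)]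
      simp only [List.cons.injEq, and_true]
      constructor <;> push_cast <;> omega

-- shrinkB does not depend on the fuel once it exceeds k
theorem shrink_fuel_irrel : ∀ (f1 f2 k : Nat), k < f1 → k < f2 → shrinkB f1 k = shrinkB f2 k := by
  intro f1 f2 k
  induction k using Nat.strong_induction_on generalizing f1 f2 with
  | _ k ih =>
    intro h1 h2
    obtain ⟨g1, rfl⟩ : ∃ g, f1 = g + 1 := ⟨f1 - 1, by omega⟩
    obtain ⟨g2, rfl⟩ : ∃ g, f2 = g + 1 := ⟨f2 - 1, by omega⟩
    rw [shrinkB, shrinkB]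
    rcases Nat.lt_or_ge k 2 with h | h
    · simp [show k ≤ 1 by omega]
    · have hp := pvStats_snd_lt k h
      rw [if_neg (show ¬ k ≤ 1 by omega), if_neg (show ¬ k ≤ 1 by omega)]
      dsimp only
      rw [ih (pvStats k).2 hp g1 g2 (by omega) (by omega)]

-- ===== VERDICT (by name: the statement is the Claim_ definition above) =====
theorem solution_spec : Claim_equal_solution := by
  intro s _
  unfold Spec_solution solution solution_alt
  set l := s.toList with hl
  set n := l.length with hn
  rcases Nat.lt_or_ge n 2 with h | h
  · rw [loopA_short _ _ _ _ (by omega)]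
    simp [show n ≤ 1 by omega]
  · rw [if_neg (by omega : ¬ n ≤ 1)]
    have hz : l.count '0' ≤ n := List.count_le_length
    set ones := n - l.count '0' with hones
    have hfl : (l.filter (fun c => c ≠ '0')).length = ones := by
      have := filter_length_count_add l
      omega
    show loopA (n + 3) l 0 0 = _
    rw [loopA]
    simp only [if_pos (by omega : l.length > 1)]
    rcases Nat.lt_or_ge ones 2 with ho | ho
    · -- 0 or 1 survivors: loop ends this round or right after
      have hsz : shrinkB (ones + 1) ones = (0, 0) := by
        rw [shrinkB]; simp [show ones ≤ 1 by omega]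
      by_cases ht : l.filter (fun c => c ≠ '0') = ['1']
      · rw [if_pos ht]
        simp [hsz]
        push_cast; omega
      · rw [if_neg ht]
        rw [loopA_short _ _ _ _ (by
          rw [hfl]
          interval_cases ones <;> simp [pvBin, pvBinPos])]
        simp [hsz]
        push_cast; omega
    · -- ≥ 2 survivors: A continues with bin(ones), which is loopA_shrink's case
      have ht : l.filter (fun c => c ≠ '0') ≠ ['1'] := by
        intro hcontra
        have := congrArg List.length hcontra
        rw [hfl] at this
        simp at this
        omega
      rw [if_neg ht]
      have hbin : pvBin (l.filter (fun c => c ≠ '0')).length = pvBinPos ones := by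
        rw [hfl]; simp [pvBin]; omega
      rw [hbin, loopA_shrink (n + 2) ones _ _ ho (by omega)]
      have hfuel : shrinkB (n + 2) ones = shrinkB (ones + 1) ones := by
        exact shrink_fuel_irrel (n + 2) (ones + 1) ones (by omega) (by omega)
      rw [hfuel]
      simp
      constructor <;> push_cast <;> omega
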